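-- pv_equiv track=rewrite | github.com/anik8mishra/style_test1 | backend/app/ai/color_analysis.py | _calculate_color_temperature
-- ===== SOURCE A (Python) =====
-- from typing import List, Dict, Tuple
--
-- def _calculate_color_temperature(colors: List[str]) -> str:
--     """Calculate overall color temperature"""
--     warm_colors = ['red', 'orange', 'yellow', 'pink', 'brown']
--     cool_colors = ['blue', 'green', 'purple', 'gray']
--
--     warm_count = sum(1 for color in colors if color in warm_colors)
--     cool_count = sum(1 for color in colors if color in cool_colors)
--
--     if warm_count > cool_count:
--         return 'warm'
--     elif cool_count > warm_count:
--         return 'cool'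
--     else:
--         return 'neutral'
-- ===== SOURCE B (Python) =====
-- def _calculate_color_temperature(colors):
--     """Calculate overall color temperature"""
--     weights = {'red': 1, 'orange': 1, 'yellow': 1, 'pink': 1, 'brown': 1,
--                'blue': -1, 'green': -1, 'purple': -1, 'gray': -1}
--     score = 0
--     for color in colors:
--         score += weights.get(color, 0)
--     if score > 0:
--         return 'warm'
--     if score < 0:
--         return 'cool'
--     return 'neutral'
-- ===== Notes on version B (the rewrite author's own statement) =====
-- stated objective: simpler
-- what changed: Replaces the two independent membership-counting passes with a single pass that keeps one signed score via a color->weight dict (+1 warm, -1 cool) and compares the score to zero.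
import Mathlib
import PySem

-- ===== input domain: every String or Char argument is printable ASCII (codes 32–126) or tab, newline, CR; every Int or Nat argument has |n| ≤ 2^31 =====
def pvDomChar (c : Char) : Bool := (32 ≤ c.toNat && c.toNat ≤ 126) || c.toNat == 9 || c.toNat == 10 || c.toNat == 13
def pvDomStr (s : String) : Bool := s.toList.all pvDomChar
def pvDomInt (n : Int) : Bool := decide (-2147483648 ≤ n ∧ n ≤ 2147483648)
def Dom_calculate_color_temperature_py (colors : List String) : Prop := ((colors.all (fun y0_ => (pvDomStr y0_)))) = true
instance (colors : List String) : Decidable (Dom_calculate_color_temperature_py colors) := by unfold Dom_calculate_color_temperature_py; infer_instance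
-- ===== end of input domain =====

-- B replaces A's two membership-counting passes with a single pass keeping one signed score (simpler decomposition).


-- ===== PORT A =====
def pvWarmColors : List String := ["red", "orange", "yellow", "pink", "brown"]
def pvCoolColors : List String := ["blue", "green", "purple", "gray"]

def calculate_color_temperature_py (colors : List String) : String :=
  let warm_count : Int := colors.foldl (fun acc color => if color ∈ pvWarmColors then acc + 1 else acc) 0
  let cool_count : Int := colors.foldl (fun acc color => if color ∈ pvCoolColors then acc + 1 else acc) 0
  if warm_count > cool_count then "warm"
  else if cool_count > warm_count then "cool"
  else "neutral"

-- ===== PORT B =====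
-- B's weights dict literal: color ↦ +1 (warm) / -1 (cool), built in insertion order
def pvWeights : PySem.Dict String Int :=
  (((((((((PySem.Dict.empty.insert "red" 1).insert "orange" 1).insert "yellow" 1).insert
    "pink" 1).insert "brown" 1).insert "blue" (-1)).insert "green" (-1)).insert
    "purple" (-1)).insert "gray" (-1))

def calculate_color_temperature_py_alt (colors : List String) : String :=
  let score : Int := colors.foldl (fun score color => score + PySem.Dict.getD pvWeights color 0) 0
  if score > 0 then "warm"
  else if score < 0 then "cool"
  else "neutral"

-- ===== PRECONDITION & SPEC =====
def Spec_calculate_color_temperature_py (colors : List String) (out : String) : Prop := out = calculate_color_temperature_py_alt colors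
instance (colors : List String) (out : String) : Decidable (Spec_calculate_color_temperature_py colors out) := by unfold Spec_calculate_color_temperature_py; infer_instance

-- ===== CLAIM (what is proved, stated in full; the proofs are below) =====
def Claim_equal_calculate_color_temperature_py : Prop := ∀ (colors : List String), Dom_calculate_color_temperature_py colors → Spec_calculate_color_temperature_py colors (calculate_color_temperature_py colors)

-- ===== LEMMAS AND PROOFS =====

-- per-element: B's weight = (warm indicator) - (cool indicator)
theorem pv_weight_eq (c : String) :
    PySem.Dict.getD pvWeights c 0
      = (if c ∈ pvWarmColors then (1:Int) else 0) - (if c ∈ pvCoolColors then (1:Int) else 0) := by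
  by_cases hw : c ∈ pvWarmColors
  · simp only [pvWarmColors, List.mem_cons, List.not_mem_nil, or_false] at hw
    rcases hw with rfl | rfl | rfl | rfl | rfl <;> decide
  · by_cases hc : c ∈ pvCoolColors
    · simp only [pvCoolColors, List.mem_cons, List.not_mem_nil, or_false] at hc
      rcases hc with rfl | rfl | rfl | rfl <;> decide
    · simp only [if_neg hw, if_neg hc, sub_zero]
      simp only [pvWarmColors, pvCoolColors, List.mem_cons, List.not_mem_nil, or_false,
        not_or] at hw hc
      simp [pvWeights, PySem.Dict.getD_insert, hw.1, hw.2.1, hw.2.2.1, hw.2.2.2.1,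
        hw.2.2.2.2, hc.1, hc.2.1, hc.2.2.1, hc.2.2.2]

-- loop invariant: score fold = warm fold − cool fold (generalized over accumulators)
theorem pv_score_eq (colors : List String) (s w c : Int) (h : s = w - c) :
    colors.foldl (fun score color => score + PySem.Dict.getD pvWeights color 0) s
      = colors.foldl (fun acc color => if color ∈ pvWarmColors then acc + 1 else acc) w
        - colors.foldl (fun acc color => if color ∈ pvCoolColors then acc + 1 else acc) c := by
  induction colors generalizing s w c with
  | nil => simpa using h
  | cons x xs ih =>
    simp only [List.foldl_cons]
    apply ih
    rw [pv_weight_eq x]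
    split_ifs <;> omega

-- ===== VERDICT (by name: the statement is the Claim_ definition above) =====
theorem calculate_color_temperature_py_spec : Claim_equal_calculate_color_temperature_py := by
  intro colors _
  unfold Spec_calculate_color_temperature_py calculate_color_temperature_py calculate_color_temperature_py_alt
  dsimp only
  rw [pv_score_eq colors 0 0 0 (by omega)]
  set w := colors.foldl (fun acc color => if color ∈ pvWarmColors then acc + 1 else acc) (0:Int)
  set c := colors.foldl (fun acc color => if color ∈ pvCoolColors then acc + 1 else acc) (0:Int)
  split_ifs <;> first | rfl | omega
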